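-- pv_equiv track=rewrite | github.com/DeflateAwning/Framework-Braille-Display | exploratory/braille_cell_mask_pattern/braille_cell_mask_pattern_per_col.py | is_complete_mask
-- ===== SOURCE A (Python) =====
-- def int_to_bool_array(n: int, bit_length: int | None = None):
--     # Convert the integer to a binary string and strip the '0b' prefix
--     binary_str = bin(n)[2:]
--
--     # If bit_length is specified, pad the binary string with leading zeros
--     if bit_length:
--         binary_str = binary_str.zfill(bit_length)
--
--     # Convert the binary string to a list of boolean values
--     bool_array = [bit == "1" for bit in binary_str]
--
--     return bool_array
--
-- def is_complete_mask(mask: list[bool]) -> bool: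
--     """Check if a mask covers all 8 patterns."""
--     assert all(
--         isinstance(dot, bool) for dot in mask
--     ), "Mask must be a list of booleans."
--
--     for i in range(8):
--         pattern = int_to_bool_array(i, 3)
--
--         # If `pattern` is not a sub-list of `mask`, then `mask` is not complete.
--         found_pattern = False
--         for start_idx in range(0, len(mask) - 2):
--             if mask[start_idx : start_idx + 3] == pattern:
--                 found_pattern = True
--                 break
--
--         if not found_pattern:
--             return False
--
--     return True
-- ===== SOURCE B (Python) =====
-- def is_complete_mask(mask: list[bool]) -> bool:
--     """Check if a mask covers all 8 patterns."""
--     assert all(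
--         isinstance(dot, bool) for dot in mask
--     ), "Mask must be a list of booleans."
--
--     windows = {tuple(mask[i : i + 3]) for i in range(len(mask) - 2)}
--     return len(windows) == 8
-- ===== Notes on version B (the rewrite author's own statement) =====
-- stated objective: simpler
-- what changed: Replaces the nested loops (for each of 8 generated 3-bit patterns, scan the whole mask for a matching window) with a single pass that collects the distinct length-3 windows into a set and checks its size is 8; the 8-pattern outer loop, the pattern generator and the per-pattern scan disappear.
import Mathlib
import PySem

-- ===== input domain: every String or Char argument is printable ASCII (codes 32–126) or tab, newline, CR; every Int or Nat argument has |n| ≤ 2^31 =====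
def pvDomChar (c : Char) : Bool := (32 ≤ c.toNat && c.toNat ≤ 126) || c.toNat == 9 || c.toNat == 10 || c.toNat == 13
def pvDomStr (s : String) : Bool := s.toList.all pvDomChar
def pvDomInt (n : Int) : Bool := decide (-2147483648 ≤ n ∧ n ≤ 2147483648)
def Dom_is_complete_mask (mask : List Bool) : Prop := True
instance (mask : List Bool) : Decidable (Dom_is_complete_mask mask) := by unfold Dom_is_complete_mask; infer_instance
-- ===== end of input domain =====

-- B replaces the 8-pattern nested scans with one pass collecting the distinct 3-windows into a set and checking its size is 8 (simpler).

-- ===== PORT A =====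
-- bin(n)[2:] for n ≥ 0 (A only calls this with n in 0..7), zfill, then bit == '1' per char; exact on that domain
def int_to_bool_array (n : Int) (bitLength : Option Int) : List Bool :=
  let binaryStr := Nat.toDigits 2 n.toNat
  let binaryStr :=
    match bitLength with
    | some bl => if bl ≠ 0 then List.replicate (bl.toNat - binaryStr.length) '0' ++ binaryStr else binaryStr
    | none => binaryStr
  binaryStr.map (fun bit => bit == '1')

def is_complete_mask (mask : List Bool) : Bool :=
  -- for i in range(8): pattern = ...; inner loop with break = any; early 'return False' = all
  (PySem.List.pyRange 0 8 1).all (fun i =>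
    let pattern := int_to_bool_array i (some 3)
    (PySem.List.pyRange 0 ((mask.length : Int) - 2) 1).any (fun s =>
      PySem.List.slice mask (some s) (some (s + 3)) == pattern))

-- ===== PORT B =====
def is_complete_mask_alt (mask : List Bool) : Bool :=
  let windows : PySem.Set (List Bool) :=
    PySem.Set.ofList ((PySem.List.pyRange 0 ((mask.length : Int) - 2) 1).map
      (fun i => PySem.List.slice mask (some i) (some (i + 3))))
  windows.length == 8

-- ===== PRECONDITION & SPEC =====
def Spec_is_complete_mask (mask : List Bool) (out : Bool) : Prop := out = is_complete_mask_alt mask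
instance (mask : List Bool) (out : Bool) : Decidable (Spec_is_complete_mask mask out) := by unfold Spec_is_complete_mask; infer_instance

-- ===== CLAIM (what is proved, stated in full; the proofs are below) =====
def Claim_equal_is_complete_mask : Prop := ∀ (mask : List Bool), Dom_is_complete_mask mask → Spec_is_complete_mask mask (is_complete_mask mask)

-- ===== LEMMAS AND PROOFS =====

-- the list of windows both ports range over
def pvWins (mask : List Bool) : List (List Bool) :=
  (PySem.List.pyRange 0 ((mask.length : Int) - 2) 1).map
    (fun i => PySem.List.slice mask (some i) (some (i + 3)))

-- all 8 three-bit patterns, in A's order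
def pvAllP : List (List Bool) :=
  [[false,false,false],[false,false,true],[false,true,false],[false,true,true],
   [true,false,false],[true,false,true],[true,true,false],[true,true,true]]

lemma pv_len3_mem_allP (w : List Bool) (h : w.length = 3) : w ∈ pvAllP := by
  rcases w with _ | ⟨a, _ | ⟨b, _ | ⟨c, _ | ⟨d, t⟩⟩⟩⟩ <;> try simp at h
  cases a <;> cases b <;> cases c <;> decide

lemma pv_wins_len3 (mask : List Bool) (w : List Bool) (hw : w ∈ pvWins mask) : w.length = 3 := by
  simp only [pvWins, List.mem_map] at hw
  obtain ⟨i, hi, rfl⟩ := hw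
  rw [PySem.List.mem_pyRange_one] at hi
  rw [PySem.List.slice_toNat (ha := hi.1) (hb := by omega)]
  simp only [List.length_take, List.length_drop]
  omega

lemma pv_any_iff (mask : List Bool) (p : List Bool) :
    ((PySem.List.pyRange 0 ((mask.length : Int) - 2) 1).any (fun s =>
      PySem.List.slice mask (some s) (some (s + 3)) == p)) = true ↔ p ∈ pvWins mask := by
  simp only [pvWins, List.any_eq_true, beq_iff_eq, List.mem_map]

lemma pvA_iff (mask : List Bool) :
    is_complete_mask mask = true ↔ ∀ p ∈ pvAllP, p ∈ pvWins mask := by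
  have h8 : PySem.List.pyRange 0 8 1 = [0, 1, 2, 3, 4, 5, 6, 7] := by decide
  unfold is_complete_mask
  rw [h8]
  simp only [List.all_cons, List.all_nil, Bool.and_eq_true, and_true]
  have hp0 : int_to_bool_array 0 (some 3) = [false, false, false] := by decide
  have hp1 : int_to_bool_array 1 (some 3) = [false, false, true] := by decide
  have hp2 : int_to_bool_array 2 (some 3) = [false, true, false] := by decide
  have hp3 : int_to_bool_array 3 (some 3) = [false, true, true] := by decide
  have hp4 : int_to_bool_array 4 (some 3) = [true, false, false] := by decide
  have hp5 : int_to_bool_array 5 (some 3) = [true, false, true] := by decide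
  have hp6 : int_to_bool_array 6 (some 3) = [true, true, false] := by decide
  have hp7 : int_to_bool_array 7 (some 3) = [true, true, true] := by decide
  simp only [hp0, hp1, hp2, hp3, hp4, hp5, hp6, hp7, pv_any_iff]
  simp [pvAllP]

lemma pvB_iff (mask : List Bool) :
    is_complete_mask_alt mask = true ↔ ∀ p ∈ pvAllP, p ∈ pvWins mask := by
  have halt : is_complete_mask_alt mask = ((PySem.Set.ofList (pvWins mask)).length == 8) := rfl
  rw [halt, beq_iff_eq]
  have hnd : (PySem.Set.ofList (pvWins mask) : List (List Bool)).Nodup := PySem.Set.nodup_ofList _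
  have hlen : (PySem.Set.ofList (pvWins mask) : List (List Bool)).toFinset.card
      = (PySem.Set.ofList (pvWins mask) : List (List Bool)).length :=
    List.toFinset_card_of_nodup hnd
  have hTF : (PySem.Set.ofList (pvWins mask) : List (List Bool)).toFinset = (pvWins mask).toFinset := by
    ext x; simp [List.mem_toFinset, PySem.Set.mem_ofList]
  have hsub : (pvWins mask).toFinset ⊆ pvAllP.toFinset := by
    intro x hx
    rw [List.mem_toFinset] at hx ⊢
    exact pv_len3_mem_allP x (pv_wins_len3 mask x hx)
  have hP : pvAllP.toFinset.card = 8 := by decide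
  constructor
  · intro h p hp
    have hc : pvAllP.toFinset.card ≤ (pvWins mask).toFinset.card := by
      rw [← hTF, hlen, h, hP]
    have heq : (pvWins mask).toFinset = pvAllP.toFinset :=
      Finset.eq_of_subset_of_card_le hsub hc
    have : p ∈ (pvWins mask).toFinset := by rw [heq, List.mem_toFinset]; exact hp
    rwa [List.mem_toFinset] at this
  · intro h
    have hsub2 : pvAllP.toFinset ⊆ (pvWins mask).toFinset := by
      intro x hx
      rw [List.mem_toFinset] at hx ⊢
      exact h x hx
    have heq : (pvWins mask).toFinset = pvAllP.toFinset :=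
      Finset.Subset.antisymm hsub hsub2
    rw [← hlen, hTF, heq, hP]

-- ===== VERDICT (by name: the statement is the Claim_ definition above) =====
theorem is_complete_mask_spec : Claim_equal_is_complete_mask := by
  intro mask _
  unfold Spec_is_complete_mask
  rw [Bool.eq_iff_iff, pvA_iff, pvB_iff]
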